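-- pv_equiv track=rewrite | github.com/ju-sants/crm-multiagent-ai-integration | app/services/eleven_labs_service.py | normalize_symbols_for_tts
-- ===== SOURCE A (Python) =====
-- def normalize_symbols_for_tts(text: str) -> str:
--
--     symbols_to_words = {
--         '+': 'mais',
--         '-': 'menos',
--         '*': 'vezes',
--         '/': 'dividido por',
--         '=': 'igual a',
--         '(': 'abre parênteses',
--         ')': 'fecha parênteses',
--     }
--
--     for symbol, word in symbols_to_words.items():
--         text = text.replace(symbol, f' {word} ')
--
--     return text
-- ===== SOURCE B (Python) =====
-- def normalize_symbols_for_tts(text: str) -> str: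
--
--     symbols_to_words = {
--         '+': 'mais',
--         '-': 'menos',
--         '*': 'vezes',
--         '/': 'dividido por',
--         '=': 'igual a',
--         '(': 'abre parênteses',
--         ')': 'fecha parênteses',
--     }
--
--     return ''.join(
--         f' {symbols_to_words[ch]} ' if ch in symbols_to_words else ch
--         for ch in text
--     )
-- ===== Notes on version B (the rewrite author's own statement) =====
-- stated objective: alternative
-- what changed: Replaces seven sequential whole-string str.replace passes with a single character-by-character pass that looks each character up once in the symbol dictionary and joins the pieces; it trades C-level replace scans for one Python-level pass.
import Mathlib
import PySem

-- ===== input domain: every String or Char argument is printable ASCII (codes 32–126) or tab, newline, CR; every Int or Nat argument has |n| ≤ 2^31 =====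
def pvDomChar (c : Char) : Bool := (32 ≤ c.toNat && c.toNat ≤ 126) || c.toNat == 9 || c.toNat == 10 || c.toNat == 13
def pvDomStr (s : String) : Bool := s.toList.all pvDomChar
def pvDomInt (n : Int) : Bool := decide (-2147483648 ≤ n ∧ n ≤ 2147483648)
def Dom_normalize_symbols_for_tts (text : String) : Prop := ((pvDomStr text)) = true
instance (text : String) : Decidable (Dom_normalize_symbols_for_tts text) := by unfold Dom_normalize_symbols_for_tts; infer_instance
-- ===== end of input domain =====

-- B replaces A's seven sequential whole-string str.replace passes with a single
-- character pass joining per-character dictionary lookups (objective: alternative algorithm, same result).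

-- ===== PORT A =====
def pvSymbolsToWords : PySem.Dict String String :=
  PySem.Dict.ofList
    [("+", "mais"), ("-", "menos"), ("*", "vezes"), ("/", "dividido por"),
     ("=", "igual a"), ("(", "abre parênteses"), (")", "fecha parênteses")]

def normalize_symbols_for_tts (text : String) : String :=
  pvSymbolsToWords.items.foldl
    (fun t sw => PySem.Str.replace t sw.1 (" " ++ sw.2 ++ " ")) text

-- ===== PORT B =====
def normalize_symbols_for_tts_alt (text : String) : String :=
  PySem.Str.join ""
    (text.toList.map (fun ch =>
      match PySem.Dict.get? pvSymbolsToWords (String.singleton ch) with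
      | some w => " " ++ w ++ " "
      | none => String.singleton ch))

-- ===== PRECONDITION & SPEC =====
def Spec_normalize_symbols_for_tts (text : String) (out : String) : Prop := out = normalize_symbols_for_tts_alt text
instance (text : String) (out : String) : Decidable (Spec_normalize_symbols_for_tts text out) := by unfold Spec_normalize_symbols_for_tts; infer_instance

-- ===== CLAIM (what is proved, stated in full; the proofs are below) =====
def Claim_equal_normalize_symbols_for_tts : Prop := ∀ (text : String), Dom_normalize_symbols_for_tts text → Spec_normalize_symbols_for_tts text (normalize_symbols_for_tts text)

-- ===== LEMMAS AND PROOFS =====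

-- joining with the empty separator flattens
theorem pv_intercalate_nil {α : Type} (xs : List (List α)) :
    List.intercalate ([] : List α) xs = xs.flatten := by
  induction xs with
  | nil => rfl
  | cons a t ih =>
      cases t with
      | nil => simp [List.intercalate]
      | cons b u => simp_all [List.intercalate, List.intersperse]

-- replacing a single-character pattern is a flatMap over the characters
theorem replace_go_single (c : Char) (r : List Char) :
    ∀ (l : List Char) (fuel : Nat) (acc : List Char), l.length ≤ fuel →
      PySem.Chars.replace.go [c] r fuel l acc
        = acc.reverse ++ l.flatMap (fun x => if x = c then r else [x]) := by
  intro l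
  induction l with
  | nil => intro fuel acc _; cases fuel <;> simp [PySem.Chars.replace.go]
  | cons x t ih =>
      intro fuel acc h
      cases fuel with
      | zero => simp at h
      | succ n =>
        simp only [PySem.Chars.replace.go]
        by_cases hx : x = c
        · subst hx
          rw [show ([x].isPrefixOf (x :: t)) = true by simp [List.isPrefixOf]]
          simp only [if_true]
          rw [show List.drop [x].length (x :: t) = t from rfl]
          rw [ih n (r.reverse ++ acc) (by simp at h; omega)]
          simp
        · rw [show ([c].isPrefixOf (x :: t)) = false by
            simp [List.isPrefixOf]; exact fun hxc => (hx hxc.symm).elim]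
          simp only [Bool.false_eq_true, if_false]
          rw [ih n (x :: acc) (by simp at h; omega)]
          simp [hx]

theorem replace_single (c : Char) (r : List Char) (l : List Char) :
    PySem.Chars.replace l [c] r = l.flatMap (fun x => if x = c then r else [x]) := by
  simp only [PySem.Chars.replace, List.isEmpty, Bool.false_eq_true, if_false]
  exact replace_go_single c r l l.length [] (le_refl _)

-- the per-character expansion B performs
def pvExpand (ch : Char) : List Char :=
  match PySem.Dict.get? pvSymbolsToWords (String.singleton ch) with
  | some w => (" " ++ w ++ " ").toList
  | none => [ch]

theorem alt_toList (text : String) :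
    (normalize_symbols_for_tts_alt text).toList = text.toList.flatMap pvExpand := by
  simp only [normalize_symbols_for_tts_alt, PySem.Str.join, PySem.Chars.join]
  rw [String.toList_ofList]
  rw [show ("" : String).toList = [] from rfl]
  rw [pv_intercalate_nil, List.map_map, List.flatten_eq_flatMap, List.flatMap_map]
  apply List.flatMap_congr
  intro x _
  simp only [Function.comp]
  cases h : PySem.Dict.get? pvSymbolsToWords (String.singleton x) <;>
    simp [pvExpand, h, String.toList_singleton]

-- a singleton-string key differs from every other singleton-string key
theorem key_ne (c x : Char) (hx : x ≠ c) :
    ((String.singleton c) == String.singleton x) = false := by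
  rw [beq_eq_false_iff_ne]
  intro h
  have hcx : c = x := by simpa [String.toList_singleton] using congrArg String.toList h
  exact hx hcx.symm

theorem a_toList (text : String) :
    (normalize_symbols_for_tts text).toList = text.toList.flatMap pvExpand := by
  have hitems : pvSymbolsToWords.items =
      [("+", "mais"), ("-", "menos"), ("*", "vezes"), ("/", "dividido por"),
       ("=", "igual a"), ("(", "abre parênteses"), (")", "fecha parênteses")] := rfl
  simp only [normalize_symbols_for_tts, hitems, List.foldl]
  simp only [PySem.Str.replace, String.toList_ofList]
  rw [show ("+" : String).toList = ['+'] from rfl,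
      show ("-" : String).toList = ['-'] from rfl,
      show ("*" : String).toList = ['*'] from rfl,
      show ("/" : String).toList = ['/'] from rfl,
      show ("=" : String).toList = ['='] from rfl,
      show ("(" : String).toList = ['('] from rfl,
      show (")" : String).toList = [')'] from rfl]
  simp only [replace_single]
  simp only [List.flatMap_assoc]
  apply List.flatMap_congr
  intro x _
  by_cases h1 : x = '+'; · subst h1; rfl
  by_cases h2 : x = '-'; · subst h2; rfl
  by_cases h3 : x = '*'; · subst h3; rfl
  by_cases h4 : x = '/'; · subst h4; rfl
  by_cases h5 : x = '='; · subst h5; rfl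
  by_cases h6 : x = '('; · subst h6; rfl
  by_cases h7 : x = ')'; · subst h7; rfl
  have hget : PySem.Dict.get? pvSymbolsToWords (String.singleton x) = none := by
    rw [show pvSymbolsToWords.items =
      [(String.singleton '+', "mais"), (String.singleton '-', "menos"),
       (String.singleton '*', "vezes"), (String.singleton '/', "dividido por"),
       (String.singleton '=', "igual a"), (String.singleton '(', "abre parênteses"),
       (String.singleton ')', "fecha parênteses")] from rfl] at hitems
    simp only [PySem.Dict.get?]
    rw [show pvSymbolsToWords.items =
      [(String.singleton '+', "mais"), (String.singleton '-', "menos"),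
       (String.singleton '*', "vezes"), (String.singleton '/', "dividido por"),
       (String.singleton '=', "igual a"), (String.singleton '(', "abre parênteses"),
       (String.singleton ')', "fecha parênteses")] from rfl]
    simp [List.find?, key_ne _ _ h1, key_ne _ _ h2, key_ne _ _ h3, key_ne _ _ h4,
      key_ne _ _ h5, key_ne _ _ h6, key_ne _ _ h7]
  simp [pvExpand, hget, h1, h2, h3, h4, h5, h6, h7]

-- ===== VERDICT (by name: the statement is the Claim_ definition above) =====
theorem normalize_symbols_for_tts_spec : Claim_equal_normalize_symbols_for_tts := by
  intro text _
  unfold Spec_normalize_symbols_for_tts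
  apply String.ext
  rw [a_toList, alt_toList]
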